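-- pv_equiv track=rewrite | github.com/somudatta06/radius | backend/services/website_scraper.py | _classify_page_type
-- ===== SOURCE A (Python) =====
-- def _classify_page_type(path: str, title: str) -> str:
--     """Classify page type based on URL and title"""
--     path_lower = path.lower()
--     title_lower = title.lower()
--
--     if 'about' in path_lower or 'about' in title_lower:
--         return 'about'
--     elif any(word in path_lower for word in ['product', 'service', 'program']):
--         return 'products'
--     elif 'pricing' in path_lower or 'pricing' in title_lower:
--         return 'pricing'
--     elif 'career' in path_lower or 'job' in path_lower:
--         return 'careers'
--     elif 'blog' in path_lower:
--         return 'blog'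
--     else:
--         return 'general'
-- ===== SOURCE B (Python) =====
-- # Flat keyword table: (keyword, priority rank, whether the title is also searched).
-- _KEYWORDS = [
--     ('about', 0, True),
--     ('product', 1, False),
--     ('service', 1, False),
--     ('program', 1, False),
--     ('pricing', 2, True),
--     ('career', 3, False),
--     ('job', 3, False),
--     ('blog', 4, False),
-- ]
--
-- _LABELS = ['about', 'products', 'pricing', 'careers', 'blog']
--
--
-- def _classify_page_type(path: str, title: str) -> str:
--     """Classify by collecting the ranks of ALL matching keywords, then
--     taking the minimum rank (highest priority) and mapping it to a label."""
--     p = path.lower()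
--     t = title.lower()
--     ranks = [r for w, r, ct in _KEYWORDS if w in p or (ct and w in t)]
--     return _LABELS[min(ranks)] if ranks else 'general'
-- ===== Notes on version B (the rewrite author's own statement) =====
-- stated objective: alternative
-- what changed: Instead of a short-circuiting first-match cascade, B eagerly tests every keyword against the lowercased texts, collects the priority ranks of all matches, and maps the minimum rank through a label table (returning 'general' when no keyword matches).
import Mathlib
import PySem

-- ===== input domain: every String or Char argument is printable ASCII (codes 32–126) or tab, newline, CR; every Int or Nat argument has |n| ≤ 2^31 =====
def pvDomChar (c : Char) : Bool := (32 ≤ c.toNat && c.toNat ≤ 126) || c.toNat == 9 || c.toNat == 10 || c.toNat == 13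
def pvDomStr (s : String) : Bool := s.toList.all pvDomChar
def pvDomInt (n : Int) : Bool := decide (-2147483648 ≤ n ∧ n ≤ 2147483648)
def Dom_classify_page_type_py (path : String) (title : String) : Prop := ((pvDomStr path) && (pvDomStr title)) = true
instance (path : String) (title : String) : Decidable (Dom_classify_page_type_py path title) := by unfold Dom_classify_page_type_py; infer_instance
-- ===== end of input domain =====

-- B replaces A's short-circuiting if/elif cascade by an eager scan that collects the
-- priority ranks of ALL matching keywords and maps the minimum rank to a label (alternative; same cost).

-- ===== PORT A =====
def classify_page_type_py (path : String) (title : String) : String :=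
  let path_lower := PySem.Str.lower path
  let title_lower := PySem.Str.lower title
  if PySem.Str.isIn "about" path_lower || PySem.Str.isIn "about" title_lower then "about"
  else if (["product", "service", "program"].any fun word => PySem.Str.isIn word path_lower) then "products"
  else if PySem.Str.isIn "pricing" path_lower || PySem.Str.isIn "pricing" title_lower then "pricing"
  else if PySem.Str.isIn "career" path_lower || PySem.Str.isIn "job" path_lower then "careers"
  else if PySem.Str.isIn "blog" path_lower then "blog"
  else "general"

-- ===== PORT B =====
-- flat keyword table: (keyword, priority rank, whether the title is also searched)
def pvKeywords : List (String × Nat × Bool) :=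
  [("about", 0, true),
   ("product", 1, false),
   ("service", 1, false),
   ("program", 1, false),
   ("pricing", 2, true),
   ("career", 3, false),
   ("job", 3, false),
   ("blog", 4, false)]

def pvLabels : List String := ["about", "products", "pricing", "careers", "blog"]

def classify_page_type_py_alt (path : String) (title : String) : String :=
  let p := PySem.Str.lower path
  let t := PySem.Str.lower title
  let ranks := pvKeywords.filterMap fun wrc =>
    if PySem.Str.isIn wrc.1 p || (wrc.2.2 && PySem.Str.isIn wrc.1 t) then some wrc.2.1 else none
  match ranks.min? with
  | some m => pvLabels.getD m "general"
  | none => "general"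

-- ===== PRECONDITION & SPEC =====
def Spec_classify_page_type_py (path : String) (title : String) (out : String) : Prop := out = classify_page_type_py_alt path title
instance (path : String) (title : String) (out : String) : Decidable (Spec_classify_page_type_py path title out) := by unfold Spec_classify_page_type_py; infer_instance

-- ===== CLAIM (what is proved, stated in full; the proofs are below) =====
def Claim_equal_classify_page_type_py : Prop := ∀ (path : String) (title : String), Dom_classify_page_type_py path title → Spec_classify_page_type_py path title (classify_page_type_py path title)

-- ===== LEMMAS AND PROOFS =====

-- ===== VERDICT (by name: the statement is the Claim_ definition above) =====
theorem classify_page_type_py_spec : Claim_equal_classify_page_type_py := by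
  intro path title _
  unfold Spec_classify_page_type_py classify_page_type_py classify_page_type_py_alt pvKeywords pvLabels
  simp only [List.filterMap, List.any_cons, List.any_nil, Bool.or_false, Bool.false_and, Bool.true_and]
  generalize PySem.Str.isIn "about" (PySem.Str.lower path) = a1
  generalize PySem.Str.isIn "about" (PySem.Str.lower title) = a2
  generalize PySem.Str.isIn "product" (PySem.Str.lower path) = b1
  generalize PySem.Str.isIn "service" (PySem.Str.lower path) = b2
  generalize PySem.Str.isIn "program" (PySem.Str.lower path) = b3
  generalize PySem.Str.isIn "pricing" (PySem.Str.lower path) = c1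
  generalize PySem.Str.isIn "pricing" (PySem.Str.lower title) = c2
  generalize PySem.Str.isIn "career" (PySem.Str.lower path) = d1
  generalize PySem.Str.isIn "job" (PySem.Str.lower path) = d2
  generalize PySem.Str.isIn "blog" (PySem.Str.lower path) = e1
  revert a1 a2 b1 b2 b3 c1 c2 d1 d2 e1
  decide
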